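-- pv_equiv track=rewrite | github.com/matslindh/codingchallenges | adventofcode2023/day13.py | score_combined
-- ===== SOURCE A (Python) =====
-- from itertools import pairwise, islice
--
-- def find_reflection_indexes(lines):
--     possible_reflections = set()
--
--     for (idx_1, line), (idx_2, line2) in pairwise(enumerate(lines)):
--         if line == line2:
--             possible_reflections.add(idx_1)
--
--     return possible_reflections
--
-- def valid_reflection_index(lines):
--     return set(filter(lambda x: has_reflection_from_index(lines, x), find_reflection_indexes(lines)))
--
-- def has_reflection_from_index(lines, idx):
--     for low, high in zip(range(idx, -1, -1), range(idx+1, len(lines))):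
--         if lines[low] != lines[high]:
--             return False
--
--     return True
--
-- def score_reflection(lines):
--     reflection_idx = valid_reflection_index(lines)
--
--     if reflection_idx:
--         return (reflection_idx.pop() + 1) * 100
--
--     lines = list(zip(*lines))
--
--     reflection_idx = valid_reflection_index(lines)
--
--     if reflection_idx:
--         return reflection_idx.pop() + 1
--
--     pass
--
-- def score_combined(lines):
--     batch = []
--     score = 0
--
--     for line in lines:
--         if not line:
--             score += score_reflection(batch)
--             batch = []
--         else:
--             batch.append(line)
--
--     if batch:
--         score += score_reflection(batch)
--
--     return score
-- ===== SOURCE B (Python) =====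
-- def score_combined(lines):
--     # A reflection line is an even palindromic window: a horizontal line after row p
--     # iff the rows around p read the same forwards and backwards (slice == reversed slice);
--     # a vertical line is found WITHOUT transposing, by intersecting each row's set of
--     # palindromic split positions.
--     def splits(seq):
--         n = len(seq)
--         return {p for p in range(1, n)
--                 if seq[max(0, 2 * p - n):p] == seq[p:2 * p][::-1]}
--
--     def score(rows):
--         h = splits(rows)
--         if h:
--             return min(h) * 100
--         w = min(len(r) for r in rows)
--         common = set(range(1, w))
--         for r in rows:
--             common &= splits(r[:w])
--         return min(common)
--
--     total = 0
--     block = []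
--     for line in lines:
--         if line:
--             block.append(line)
--         else:
--             total += score(block)
--             block = []
--     if block:
--         total += score(block)
--     return total
-- ===== Notes on version B (the rewrite author's own statement) =====
-- stated objective: alternative
-- what changed: B characterises a reflection line as an even palindromic window (slice == reversed slice) instead of A's per-index low/high mirror expansion over a pre-filtered candidate set, and finds vertical lines without transposing by intersecting each row's set of palindromic split positions; A's two-phase candidate machinery, pairwise pre-filter and transpose disappear (fewer passes and bulk slice comparisons give a constant-factor speedup).
-- outside the precondition, e.g. on score_combined(['#', '.', '.', '#', '#', '.', '.', '#', '.', '.']): A returns 900, B returns 200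
import Mathlib
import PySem

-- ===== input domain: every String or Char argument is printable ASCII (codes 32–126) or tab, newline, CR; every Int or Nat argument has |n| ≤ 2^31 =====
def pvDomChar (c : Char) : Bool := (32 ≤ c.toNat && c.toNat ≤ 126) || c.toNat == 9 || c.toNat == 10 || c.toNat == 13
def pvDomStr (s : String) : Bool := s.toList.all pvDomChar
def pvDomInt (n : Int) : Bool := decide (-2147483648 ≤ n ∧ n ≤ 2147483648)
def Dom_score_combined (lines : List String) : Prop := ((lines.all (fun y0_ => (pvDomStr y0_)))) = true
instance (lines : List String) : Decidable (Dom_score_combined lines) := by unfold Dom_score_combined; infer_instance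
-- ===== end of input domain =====

-- B finds reflection lines as even palindromic windows (slice == reversed slice) and finds
-- vertical lines without transposing, by intersecting each row's set of palindromic split
-- positions; A's candidate-set/filter/set.pop machinery and transpose retry disappear.
-- Objective: alternative. Equality is claimed on Pre_: every block has a reflection line
-- (horizontal, or else vertical) with a pop-deterministic index set — outside that A's set.pop
-- tie-break is hash-order accidental or A raises TypeError (None + int).

-- ===== PORT A =====
-- zip(*rows): truncating transpose (A calls the zip builtin).
-- j ranges below every row length, so getD never takes its default.
def pyZipT (rows : List (List Char)) : List (List Char) :=
  match rows with
  | [] => []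
  | r :: rs =>
    (List.range (rs.foldl (fun m cs => min m cs.length) r.length)).map
      (fun j => (r :: rs).map (fun cs => cs.getD j ' '))

-- pairwise(enumerate(lines)) = zip of the enumeration with its tail; the loop adds idx_1 on equal lines
def findReflectionIndexes {α : Type} [BEq α] (lines : List α) : PySem.Set Int :=
  ((PySem.List.enumerate lines).zip ((PySem.List.enumerate lines).drop 1)).foldl
    (fun s p => if p.1.2 == p.2.2 then PySem.Set.add s p.1.1 else s) PySem.Set.empty

-- the early-return-False loop is `all`; both indices are always in range here,
-- so comparing the pyGet? options is exact
def hasReflectionFromIndex {α : Type} [BEq α] (lines : List α) (idx : Int) : Bool :=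
  ((PySem.List.pyRange idx (-1) (-1)).zip (PySem.List.pyRange (idx + 1) (lines.length : Int))).all
    (fun p => PySem.List.pyGet? lines p.1 == PySem.List.pyGet? lines p.2)

def validReflectionIndex {α : Type} [BEq α] (lines : List α) : PySem.Set Int :=
  PySem.Set.ofList (List.filter (fun x => hasReflectionFromIndex lines x) (findReflectionIndexes lines))

-- set.pop(): ported as the first element; exact only where Pre_'s pop-safety holds
def scoreReflection (lines : List String) : Option Int :=
  match validReflectionIndex lines with
  | i :: _ => some ((i + 1) * 100)
  | [] =>
    match validReflectionIndex (pyZipT (lines.map String.toList)) with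
    | j :: _ => some (j + 1)
    | [] => none            -- Python falls off the end and returns None

def score_combined (lines : List String) : Int :=
  let st := lines.foldl
    (fun (st : List String × Int) line =>
      if line == "" then ([], st.2 + (scoreReflection st.1).getD 0)
      else (st.1 ++ [line], st.2)) ([], 0)
  if st.1.isEmpty then st.2 else st.2 + (scoreReflection st.1).getD 0
-- (where scoreReflection is none Python raises TypeError on None + int; Pre_ excludes those inputs,
--  the port uses 0 there)

-- ===== PORT B =====
-- the set comprehension {p for p in range(1, n) if seq[max(0, 2p-n):p] == seq[p:2p][::-1]}
-- ([::-1] on a list slice is List.reverse); over distinct increasing p, set() keeps them in order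
def pvSplits {α : Type} [BEq α] (seq : List α) : PySem.Set Int :=
  PySem.Set.ofList ((PySem.List.pyRange 1 (seq.length : Int) 1).filter (fun p =>
    PySem.List.slice seq (some (max 0 (2 * p - (seq.length : Int)))) (some p)
      == (PySem.List.slice seq (some p) (some (2 * p))).reverse))

-- score(rows) of Source B; min(...) over a set is order-independent, ported as PySem.List.min?;
-- Python raises ValueError on min of an empty set/generator — Pre_ excludes those inputs, the
-- port uses 0 there. String slicing r[:w] is ported on toList (exact).
def pvScoreBlockB (rows : List String) : Int :=
  match PySem.List.min? (pvSplits rows) (fun x => x) with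
  | some m => m * 100
  | none =>
    match PySem.List.min? (rows.map (fun r => PySem.Str.len r)) (fun x => x) with
    | none => 0
    | some wI =>   -- w = wI.toNat, common = the running intersection, inlined
      match PySem.List.min? (rows.foldl
          (fun (c : PySem.Set Int) r => PySem.Set.inter c (pvSplits (r.toList.take wI.toNat)))
          (PySem.Set.ofList (PySem.List.pyRange 1 (wI.toNat : Int) 1))) (fun x => x) with
      | some m => m
      | none => 0

def score_combined_alt (lines : List String) : Int :=
  let st := lines.foldl
    (fun (st : Int × List String) line =>
      if line == "" then (st.1 + pvScoreBlockB st.2, []) else (st.1, st.2 ++ [line])) (0, [])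
  if st.2.isEmpty then st.1 else st.1 + pvScoreBlockB st.2

-- ===== PRECONDITION & SPEC =====
-- the valid reflection indices of a grid, as a plain mirror condition
def pvMirrorIdxs {α : Type} [BEq α] (rows : List α) : List Nat :=
  (List.range (rows.length - 1)).filter (fun i =>
    (List.range (min (i + 1) (rows.length - 1 - i))).all
      (fun k => rows[i - k]? == rows[i + 1 + k]?))

-- a nonempty index list on which CPython's set.pop() deterministically yields the first
-- (smallest) index: a single index, all indices below 8, or an initial segment 0..m
def pvPopSafe (l : List Nat) : Bool :=
  !l.isEmpty && (l.length == 1 || l.all (· < 8) || l == List.range l.length)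

-- canonical block splitting (split at blank lines)
def pvBlocksAux : List String → List String → List (List String)
  | [], cur => if cur.isEmpty then [] else [cur]
  | l :: t, cur => if l == "" then cur :: pvBlocksAux t [] else pvBlocksAux t (cur ++ [l])

-- Pre_ excludes inputs where some block (split at blank lines) has no reflection line at all —
-- there Python A raises TypeError (None + int) and Python B raises ValueError (min of an empty
-- set) — and inputs where some block has several valid reflection lines in a constellation
-- where the value A's set.pop() returns is a hash-order accident.
def Pre_score_combined (lines : List String) : Prop :=
  ∀ b ∈ pvBlocksAux lines [],
    pvPopSafe (pvMirrorIdxs b) = true ∨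
    (pvMirrorIdxs b = [] ∧ pvPopSafe (pvMirrorIdxs (pyZipT (b.map String.toList))) = true)
instance (lines : List String) : Decidable (Pre_score_combined lines) := by
  unfold Pre_score_combined; infer_instance

def pvWitness_score_combined : List String := ["#.", "#.", ".#", "", "ab", "ab"]

def Spec_score_combined (lines : List String) (out : Int) : Prop := out = score_combined_alt lines
instance (lines : List String) (out : Int) : Decidable (Spec_score_combined lines out) := by
  unfold Spec_score_combined; infer_instance

-- ===== CLAIM (what is proved, stated in full; the proofs are below) =====
def Claim_equal_score_combined : Prop := ∀ (lines : List String), Dom_score_combined lines → Pre_score_combined lines → Spec_score_combined lines (score_combined lines)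

-- ===== LEMMAS AND PROOFS =====

lemma pv_zip_range (a b : Nat) :
    List.zip (List.range a) (List.range b) = (List.range (min a b)).map (fun i => (i, i)) := by
  induction a generalizing b with
  | zero => simp
  | succ n ih => cases b <;> simp_all [List.range_succ_eq_map, List.zip_map]

-- the candidate pass of A: indices of adjacent equal lines, in increasing order
lemma pv_cand_eq {α : Type} [BEq α] (xs : List α) : ∀ (s : Int),
    (((PySem.List.enumerate xs s).zip ((PySem.List.enumerate xs s).drop 1)).filter
        (fun p => p.1.2 == p.2.2)).map (fun p => p.1.1)
    = ((List.range (xs.length - 1)).filter (fun i => xs[i]? == xs[i+1]?)).map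
        (fun (i : Nat) => s + (i : Int)) := by
  induction xs with
  | nil => intro s; simp [PySem.List.enumerate_nil]
  | cons a t ih =>
    intro s
    cases t with
    | nil => simp [PySem.List.enumerate_cons, PySem.List.enumerate_nil]
    | cons b t2 =>
      have iht := ih (s + 1)
      simp only [PySem.List.enumerate_cons, List.drop_succ_cons, List.drop_zero,
        List.length_cons, Nat.add_sub_cancel] at iht ⊢
      rw [List.zip_cons_cons, List.filter_cons]
      rw [List.range_succ_eq_map, List.filter_cons]
      have hpred0 : (((a :: b :: t2)[0]? == (a :: b :: t2)[0+1]?) : Bool) = (a == b) := by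
        simp [Option.some_beq_some]
      have htail : List.filter (fun i => (a :: b :: t2)[i]? == (a :: b :: t2)[i+1]?)
            (List.map Nat.succ (List.range t2.length))
          = List.map Nat.succ (List.filter (fun i => (b :: t2)[i]? == (b :: t2)[i+1]?)
            (List.range t2.length)) := by
        rw [List.filter_map]
        congr 1
      have hmm : List.map (fun (i : Nat) => s + (i : Int)) (List.map Nat.succ
            (List.filter (fun i => (b :: t2)[i]? == (b :: t2)[i+1]?) (List.range t2.length)))
          = List.map (fun (i : Nat) => (s + 1) + (i : Int))
            (List.filter (fun i => (b :: t2)[i]? == (b :: t2)[i+1]?) (List.range t2.length)) := by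
        rw [List.map_map]
        apply List.map_congr_left
        intro i _
        simp only [Function.comp, Nat.succ_eq_add_one]
        push_cast; ring
      by_cases hab : (a == b) = true
      · simp only [hab, hpred0, if_true, List.map_cons, Nat.cast_zero, add_zero, htail, hmm, iht]
      · have hab' : (a == b) = false := by simp_all
        simp only [hab', hpred0, Bool.false_eq_true, if_false, htail, hmm, iht]

lemma pv_findRefl_eq {α : Type} [BEq α] (xs : List α) :
    findReflectionIndexes xs
    = ((List.range (xs.length - 1)).filter (fun i => xs[i]? == xs[i+1]?)).map
        (fun (i : Nat) => (i : Int)) := by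
  unfold findReflectionIndexes
  rw [PySem.List.foldl_if_eq_foldl_filter (f := fun s (p : (Int × α) × (Int × α)) => PySem.Set.add s p.1.1)]
  rw [← List.foldl_map (f := fun (p : (Int × α) × (Int × α)) => p.1.1) (g := PySem.Set.add)]
  rw [show (PySem.Set.empty : PySem.Set Int) = ([] : List Int) from rfl]
  rw [← PySem.Set.ofList_eq_foldl]
  rw [pv_cand_eq xs 0]
  simp only [zero_add]
  apply PySem.Set.ofList_eq_self_of_nodup
  exact (List.nodup_range.filter _).map (fun a b h => by exact_mod_cast h)

lemma pv_all_congr {α : Type} {l : List α} {p q : α → Bool} (h : ∀ x ∈ l, p x = q x) :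
    l.all p = l.all q := by
  induction l with
  | nil => rfl
  | cons a t ih => simp_all [List.all_cons]

lemma pv_hasRefl_eq {α : Type} [BEq α] (xs : List α) (i : Nat) :
    hasReflectionFromIndex xs (i : Int)
    = (List.range (min (i + 1) (xs.length - 1 - i))).all
        (fun k => xs[i - k]? == xs[i + 1 + k]?) := by
  unfold hasReflectionFromIndex
  rw [PySem.List.pyRange_neg_one, PySem.List.pyRange_one]
  have h1 : ((i : Int) - (-1)).toNat = i + 1 := by omega
  have h2 : (((xs.length : Nat) : Int) - ((i : Int) + 1)).toNat = xs.length - 1 - i := by omega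
  rw [h1, h2, List.zip_map, pv_zip_range, List.map_map, List.all_map]
  apply pv_all_congr
  intro k hk
  simp only [List.mem_range, lt_min_iff] at hk
  obtain ⟨hk1, hk2⟩ := hk
  simp only [Function.comp, Prod.map]
  have e1 : (i : Int) - (k : Int) = ((i - k : Nat) : Int) := by omega
  have e2 : ((i : Int) + 1) + (k : Int) = ((i + 1 + k : Nat) : Int) := by omega
  rw [e1, e2, PySem.List.pyGet?_natCast, PySem.List.pyGet?_natCast]

lemma pv_validRefl_eq {α : Type} [BEq α] [LawfulBEq α] (xs : List α) :
    validReflectionIndex xs = (pvMirrorIdxs xs).map (fun (i : Nat) => (i : Int)) := by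
  unfold validReflectionIndex
  rw [pv_findRefl_eq, List.filter_map, List.filter_filter]
  have hf : List.filter (fun i =>
        ((fun x => hasReflectionFromIndex xs x) ∘ fun (i : Nat) => (i : Int)) i
          && (xs[i]? == xs[i+1]?)) (List.range (xs.length - 1))
      = pvMirrorIdxs xs := by
    unfold pvMirrorIdxs
    apply List.filter_congr
    intro i hi
    rw [List.mem_range] at hi
    simp only [Function.comp, pv_hasRefl_eq]
    by_cases hm : (List.range (min (i + 1) (xs.length - 1 - i))).all
        (fun k => xs[i - k]? == xs[i + 1 + k]?) = true
    · have h0 := List.all_eq_true.mp hm 0 (List.mem_range.mpr (by omega))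
      simp only [Nat.sub_zero, Nat.add_zero] at h0
      simp [hm, h0]
    · simp [Bool.eq_false_iff.mpr hm]
  rw [hf]
  apply PySem.Set.ofList_eq_self_of_nodup
  exact (List.nodup_range.filter _).map (fun a b h => by exact_mod_cast h)

-- ---- B-side lemmas ----

-- the palindromic-window test of B at p = i+1 is A's mirror condition at i
lemma pv_cond_eq {α : Type} [BEq α] [LawfulBEq α] (seq : List α) (i : Nat)
    (hi : i + 1 < seq.length) :
    (PySem.List.slice seq (some (max 0 (2 * ((i : Int) + 1) - (seq.length : Int))))
        (some ((i : Int) + 1))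
      == (PySem.List.slice seq (some ((i : Int) + 1)) (some (2 * ((i : Int) + 1)))).reverse)
    = (List.range (min (i + 1) (seq.length - 1 - i))).all
        (fun k => seq[i - k]? == seq[i + 1 + k]?) := by
  rw [PySem.List.slice_toNat seq (le_max_left _ _) (by omega),
      PySem.List.slice_toNat seq (by omega) (by omega)]
  have hA : (max 0 (2 * ((i : Int) + 1) - (seq.length : Int))).toNat
      = 2 * (i + 1) - seq.length := by omega
  have hp : (((i : Int) + 1)).toNat = i + 1 := by omega
  have h2p : ((2 : Int) * ((i : Int) + 1)).toNat = 2 * (i + 1) := by omega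
  rw [hA, hp, h2p]
  set n := seq.length with hn
  set m := min (i + 1) (n - 1 - i) with hm
  have hd1 : 2 * (i + 1) - n = i + 1 - m := by omega
  have hd2 : i + 1 - (i + 1 - m) = m := by omega
  have hd3 : 2 * (i + 1) - (i + 1) = i + 1 := by omega
  rw [hd1, hd2, hd3]
  have hlenL : (List.take m (List.drop (i + 1 - m) seq)).length = m := by
    simp [List.length_take, List.length_drop]; omega
  have hlenR : (List.take (i + 1) (List.drop (i + 1) seq)).length = m := by
    simp [List.length_take, List.length_drop]; omega
  have hL : ∀ k, k < m →
      (List.take m (List.drop (i + 1 - m) seq))[m - 1 - k]? = seq[i - k]? := by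
    intro k hk
    rw [List.getElem?_take, if_pos (by omega), List.getElem?_drop]
    congr 1; omega
  have hR : ∀ k, k < m →
      ((List.take (i + 1) (List.drop (i + 1) seq)).reverse)[m - 1 - k]? = seq[i + 1 + k]? := by
    intro k hk
    rw [List.getElem?_reverse (by omega), hlenR]
    rw [List.getElem?_take, if_pos (by omega), List.getElem?_drop]
    have : m - 1 - (m - 1 - k) = k := by omega
    rw [this]
  rw [Bool.eq_iff_iff]
  simp only [beq_iff_eq, List.all_eq_true, List.mem_range]
  constructor
  · intro heq k hk
    have := congrArg (fun l => l[m - 1 - k]?) heq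
    simpa [hL k hk, hR k hk] using this
  · intro hfa
    apply List.ext_getElem?
    intro j
    by_cases hj : j < m
    · have hk : m - 1 - j < m := by omega
      have hjj : m - 1 - (m - 1 - j) = j := by omega
      have := (hL _ hk).trans ((hfa _ hk).trans (hR _ hk).symm)
      rwa [hjj] at this
    · rw [List.getElem?_eq_none (by omega), List.getElem?_eq_none (by rw [List.length_reverse, hlenR]; omega)]


-- B's split set is A's valid mirror-index set shifted by one, in increasing order
lemma pv_splits_eq {α : Type} [BEq α] [LawfulBEq α] (seq : List α) :
    pvSplits seq = (pvMirrorIdxs seq).map (fun (i : Nat) => ((i : Int) + 1)) := by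
  unfold pvSplits
  rw [PySem.List.pyRange_one]
  have h1 : ((seq.length : Int) - 1).toNat = seq.length - 1 := by omega
  rw [h1, List.filter_map]
  have h2 : List.filter ((fun p =>
        PySem.List.slice seq (some (max 0 (2 * p - (seq.length : Int)))) (some p)
          == (PySem.List.slice seq (some p) (some (2 * p))).reverse) ∘ fun (k : Nat) => (1 : Int) + k)
        (List.range (seq.length - 1)) = pvMirrorIdxs seq := by
    unfold pvMirrorIdxs
    apply List.filter_congr
    intro k hk
    rw [List.mem_range] at hk
    simp only [Function.comp]
    have e : (1 : Int) + (k : Int) = (k : Int) + 1 := by ring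
    rw [e]
    exact pv_cond_eq seq k (by omega)
  rw [h2]
  rw [List.map_congr_left (f := fun (k : Nat) => (1 : Int) + (k : Int))
    (g := fun (k : Nat) => (k : Int) + 1) (fun x _ => by ring)]
  apply PySem.Set.ofList_eq_self_of_nodup
  refine ((List.nodup_range.filter _).map ?_)
  intro a b h
  have h' : (a : Int) + 1 = (b : Int) + 1 := h
  omega


lemma pv_map_succ_pairwise {α : Type} [BEq α] (xs : List α) :
    ((pvMirrorIdxs xs).map (fun (i : Nat) => ((i : Int) + 1))).Pairwise (· < ·) := by
  unfold pvMirrorIdxs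
  refine List.Pairwise.map _ (fun a b h => by
    have : (a : Int) < (b : Int) := by exact_mod_cast h
    omega) ?_
  exact (List.pairwise_lt_range).sublist List.filter_sublist

lemma pv_foldl_min_id (t : List Int) (x : Int) (h : ∀ y ∈ t, x ≤ y) : t.foldl min x = x := by
  induction t with
  | nil => rfl
  | cons a s ih =>
    have hx : min x a = x := min_eq_left (h a (by simp))
    simp only [List.foldl_cons, hx]
    exact ih (fun y hy => h y (by simp [hy]))

lemma pv_min?_head (l : List Int) (h : l.Pairwise (· < ·)) :
    PySem.List.min? l (fun x => x) = l.head? := by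
  cases l with
  | nil => rfl
  | cons x t =>
    rw [PySem.List.min?_id_cons]
    rw [pv_foldl_min_id t x (fun y hy => le_of_lt ((List.pairwise_cons.mp h).1 y hy))]
    rfl

-- ===== block-splitting plumbing (shared shape of the two folds) =====

def pvFinA (st : List String × Int) : Int :=
  if st.1.isEmpty then st.2 else st.2 + (scoreReflection st.1).getD 0

def pvFinB (st : Int × List String) : Int :=
  if st.2.isEmpty then st.1 else st.1 + pvScoreBlockB st.2

lemma pv_scoreA_eq (ls : List String) : ∀ (batch : List String) (s : Int),
    pvFinA (ls.foldl
        (fun (st : List String × Int) line =>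
          if line == "" then ([], st.2 + (scoreReflection st.1).getD 0)
          else (st.1 ++ [line], st.2)) (batch, s))
    = s + ((pvBlocksAux ls batch).map (fun b => (scoreReflection b).getD 0)).sum := by
  induction ls with
  | nil => intro batch s; by_cases h : batch.isEmpty <;> simp [pvBlocksAux, pvFinA, h]
  | cons l t ih =>
    intro batch s
    simp only [List.foldl_cons]
    by_cases h : l = ""
    · simp only [h, pvBlocksAux, BEq.rfl, if_true, ih]
      simp; ring
    · have h' : (l == "") = false := by simp [h]
      simp only [pvBlocksAux, h', if_false, Bool.false_eq_true, ih]

lemma pv_scoreB_eq (ls : List String) : ∀ (batch : List String) (s : Int),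
    pvFinB (ls.foldl
        (fun (st : Int × List String) line =>
          if line == "" then (st.1 + pvScoreBlockB st.2, []) else (st.1, st.2 ++ [line])) (s, batch))
    = s + ((pvBlocksAux ls batch).map pvScoreBlockB).sum := by
  induction ls with
  | nil => intro batch s; by_cases h : batch.isEmpty <;> simp [pvBlocksAux, pvFinB, h]
  | cons l t ih =>
    intro batch s
    simp only [List.foldl_cons]
    by_cases h : l = ""
    · simp only [h, pvBlocksAux, BEq.rfl, if_true, ih]
      simp; ring
    · have h' : (l == "") = false := by simp [h]
      simp only [pvBlocksAux, h', if_false, Bool.false_eq_true, ih]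

-- ---- the vertical branch ----

lemma pv_foldl_min_le (t : List Nat) : ∀ x : Nat,
    t.foldl min x ≤ x ∧ ∀ y ∈ t, t.foldl min x ≤ y := by
  induction t with
  | nil => intro x; exact ⟨le_refl x, by simp⟩
  | cons a s ih =>
    intro x
    obtain ⟨h1, h2⟩ := ih (min x a)
    refine ⟨le_trans h1 (min_le_left _ _), ?_⟩
    intro y hy
    rcases List.mem_cons.mp hy with rfl | hy
    · exact le_trans h1 (min_le_right _ _)
    · exact h2 y hy

lemma pv_foldl_min_cast (t : List Nat) : ∀ x : Nat,
    (t.map (fun y : Nat => (y : Int))).foldl min (x : Int) = ((t.foldl min x : Nat) : Int) := by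
  induction t with
  | nil => intro x; rfl
  | cons a s ih =>
    intro x
    simp only [List.map_cons, List.foldl_cons]
    rw [show min (x : Int) (a : Int) = ((min x a : Nat) : Int) from (Nat.cast_min x a).symm, ih]

lemma pv_inter_fold (g : String → List Int) (rows : List String) : ∀ c : List Int,
    rows.foldl (fun (c : PySem.Set Int) r => PySem.Set.inter c (g r)) c
      = c.filter (fun p => rows.all (fun r => (g r).contains p)) := by
  induction rows with
  | nil => intro c; simp
  | cons r rows ih =>
    intro c
    simp only [List.foldl_cons, ih]
    rw [show PySem.Set.inter c (g r) = c.filter (fun x => (g r).contains x) from rfl]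
    rw [List.filter_filter]
    apply List.filter_congr
    intro p _
    simp [List.all_cons, Bool.and_comm]

lemma pv_vert_cell (rows : List String) (W : Nat)
    (hWall : ∀ r ∈ rows, W ≤ r.toList.length) (j : Nat) (hj : j + 1 < W) :
    (rows.all (fun r => (pvSplits (r.toList.take W)).contains ((1 : Int) + (j : Nat))))
    = (List.range (min (j + 1) (W - 1 - j))).all (fun k =>
        ((List.range W).map (fun x => (rows.map String.toList).map (fun cs => cs.getD x ' ')))[j - k]?
          == ((List.range W).map (fun x => (rows.map String.toList).map (fun cs => cs.getD x ' ')))[j + 1 + k]?) := by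
  rw [Bool.eq_iff_iff]
  simp only [List.all_eq_true]
  have hc : ∀ r ∈ rows,
      ((pvSplits (r.toList.take W)).contains ((1 : Int) + (j : Nat)) = true
        ↔ ∀ k ∈ List.range (min (j + 1) (W - 1 - j)),
            (r.toList.getD (j - k) ' ' = r.toList.getD (j + 1 + k) ' ')) := by
    intro r hr
    have hWr := hWall r hr
    have hlen : (r.toList.take W).length = W := by
      simp [List.length_take]; exact hWr
    rw [pv_splits_eq]
    rw [show ∀ (l : List Int) (x : Int), PySem.Set.contains l x = l.contains x from fun _ _ => rfl]
    rw [List.contains_iff_mem, List.mem_map]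
    constructor
    · rintro ⟨i, hi, he⟩
      have : i = j := by omega
      subst this
      rw [pvMirrorIdxs, List.mem_filter, hlen] at hi
      have hall := hi.2
      rw [List.all_eq_true] at hall
      intro k hk
      have := hall k hk
      rw [List.mem_range, lt_min_iff] at hk
      rw [List.getElem?_take, if_pos (by omega), List.getElem?_take, if_pos (by omega)] at this
      rw [beq_iff_eq, List.getElem?_eq_getElem (by omega), List.getElem?_eq_getElem (by omega)] at this
      rw [List.getD_eq_getElem _ _ (by omega), List.getD_eq_getElem _ _ (by omega)]
      exact Option.some_injective _ this
    · intro hfa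
      refine ⟨j, ?_, by omega⟩
      rw [pvMirrorIdxs, List.mem_filter, hlen]
      refine ⟨List.mem_range.mpr (by omega), ?_⟩
      rw [List.all_eq_true]
      intro k hk
      have := hfa k hk
      rw [List.mem_range, lt_min_iff] at hk
      rw [List.getElem?_take, if_pos (by omega), List.getElem?_take, if_pos (by omega)]
      rw [beq_iff_eq, List.getElem?_eq_getElem (by omega), List.getElem?_eq_getElem (by omega)]
      rw [List.getD_eq_getElem _ _ (by omega), List.getD_eq_getElem _ _ (by omega)] at this
      exact congrArg some this
  have hT : ∀ k ∈ List.range (min (j + 1) (W - 1 - j)),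
      ((((List.range W).map (fun x => (rows.map String.toList).map (fun cs => cs.getD x ' ')))[j - k]?
          == ((List.range W).map (fun x => (rows.map String.toList).map (fun cs => cs.getD x ' ')))[j + 1 + k]?) = true
        ↔ ∀ r ∈ rows, r.toList.getD (j - k) ' ' = r.toList.getD (j + 1 + k) ' ') := by
    intro k hk
    rw [List.mem_range, lt_min_iff] at hk
    rw [List.getElem?_map, List.getElem?_range (by omega), List.getElem?_map,
      List.getElem?_range (by omega)]
    simp only [Option.map_some]
    rw [beq_iff_eq, Option.some_inj, List.map_eq_map_iff, List.forall_mem_map]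
  constructor
  · intro h k hk
    rw [hT k hk]
    intro r hr
    exact (hc r hr).mp (h r hr) k hk
  · intro h r hr
    rw [hc r hr]
    intro k hk
    exact (hT k hk).mp (h k hk) r hr

lemma pv_common_eq (r0 : String) (rt : List String) :
    (∀ wI, PySem.List.min? ((r0 :: rt).map (fun r => PySem.Str.len r)) (fun x => x) = some wI →
      (r0 :: rt).foldl
          (fun (c : PySem.Set Int) r => PySem.Set.inter c (pvSplits (r.toList.take wI.toNat)))
          (PySem.Set.ofList (PySem.List.pyRange 1 (wI.toNat : Int) 1))
        = (pvMirrorIdxs (pyZipT ((r0 :: rt).map String.toList))).map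
            (fun (i : Nat) => ((i : Int) + 1))) := by
  intro wI hmin
  rw [List.map_cons, PySem.List.min?_id_cons] at hmin
  have hw : wI = (((rt.map (fun r => r.toList.length)).foldl min r0.toList.length : Nat) : Int) := by
    have h := Option.some.inj hmin
    simp only [PySem.Str.len_eq] at h
    rw [show rt.map (fun r => ((r.toList.length : Nat) : Int))
        = (rt.map (fun r => r.toList.length)).map (fun y : Nat => (y : Int)) by
      rw [List.map_map]; rfl] at h
    rw [pv_foldl_min_cast] at h
    exact h.symm
  have hWtoNat : wI.toNat = (rt.map (fun r => r.toList.length)).foldl min r0.toList.length := by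
    rw [hw]; simp
  set WN := (rt.map (fun r => r.toList.length)).foldl min r0.toList.length with hWN
  have hmle := pv_foldl_min_le (rt.map (fun r => r.toList.length)) r0.toList.length
  have hWall : ∀ r ∈ r0 :: rt, WN ≤ r.toList.length := by
    intro r hr
    rcases List.mem_cons.mp hr with rfl | hr
    · exact hmle.1
    · exact hmle.2 _ (List.mem_map_of_mem hr)
  have hT : pyZipT ((r0 :: rt).map String.toList)
      = (List.range WN).map (fun x => ((r0 :: rt).map String.toList).map (fun cs => cs.getD x ' ')) := by
    simp only [List.map_cons, pyZipT]
    congr 1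
    rw [List.foldl_map, hWN, List.foldl_map]
  rw [hWtoNat]
  rw [pv_inter_fold (fun r => pvSplits (r.toList.take WN))]
  rw [PySem.Set.ofList_eq_self_of_nodup _ (PySem.List.nodup_pyRange_one 1 (WN : Int))]
  rw [hT, PySem.List.pyRange_one]
  have h1 : ((WN : Int) - 1).toNat = WN - 1 := by omega
  rw [h1, List.filter_map]
  have hlenT : ((List.range WN).map
      (fun x => ((r0 :: rt).map String.toList).map (fun cs => cs.getD x ' '))).length = WN := by
    simp
  have h2 : List.filter ((fun p => (r0 :: rt).all
          (fun r => List.contains (pvSplits (r.toList.take WN)) p)) ∘ fun (k : Nat) => (1 : Int) + k)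
        (List.range (WN - 1))
      = pvMirrorIdxs ((List.range WN).map
          (fun x => ((r0 :: rt).map String.toList).map (fun cs => cs.getD x ' '))) := by
    unfold pvMirrorIdxs
    rw [hlenT]
    apply List.filter_congr
    intro j hj
    rw [List.mem_range] at hj
    simp only [Function.comp]
    exact pv_vert_cell (r0 :: rt) WN hWall j (by omega)
  rw [h2]
  rw [List.map_congr_left (f := fun (k : Nat) => (1 : Int) + (k : Int))
    (g := fun (k : Nat) => (k : Int) + 1) (fun x _ => by ring)]


-- per-block agreement: A's score (pop = head under Pre_) equals B's score
lemma pv_scoreBlock_good (b : List String)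
    (h : pvPopSafe (pvMirrorIdxs b) = true ∨
      (pvMirrorIdxs b = [] ∧ pvPopSafe (pvMirrorIdxs (pyZipT (b.map String.toList))) = true)) :
    (scoreReflection b).getD 0 = pvScoreBlockB b := by
  unfold scoreReflection pvScoreBlockB
  rw [pv_validRefl_eq b, pv_splits_eq b, pv_min?_head _ (pv_map_succ_pairwise b)]
  cases hmb : pvMirrorIdxs b with
  | cons i rest => simp
  | nil =>
    simp only [List.map_nil, List.head?_nil]
    cases b with
    | nil => rfl
    | cons r0 rt =>
      cases hmin : PySem.List.min? ((r0 :: rt).map (fun r => PySem.Str.len r)) (fun x => x) with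
      | none => exact absurd ((PySem.List.min?_eq_none_iff _ _).mp hmin) (by simp)
      | some wI =>
        dsimp only
        rw [pv_common_eq r0 rt wI hmin,
          pv_min?_head _ (pv_map_succ_pairwise (pyZipT ((r0 :: rt).map String.toList))),
          pv_validRefl_eq]
        cases pvMirrorIdxs (pyZipT ((r0 :: rt).map String.toList)) with
        | nil => rfl
        | cons j rest => simp

-- ===== VERDICT (by name: the statement is the Claim_ definition above) =====
theorem score_combined_spec : Claim_equal_score_combined := by
  intro lines _ hpre
  unfold Spec_score_combined score_combined score_combined_alt
  show pvFinA _ = pvFinB _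
  rw [pv_scoreA_eq, pv_scoreB_eq]
  simp only [zero_add]
  congr 1
  exact List.map_congr_left (fun b hbm => pv_scoreBlock_good b (hpre b hbm))
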